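-- pv_equiv track=rewrite | github.com/KatrinaWright/TDDExample | exampleTDD.py | application
-- ===== SOURCE A (Python) =====
-- def application(text=None):
--     if text is None:
--         return 0
--
--     # Convert to lowercase and count only letters
--     text = text.lower()
--     char_counts = {}
--
--     for char in text:
--         if char.isalnum():  # Changed from isalpha() to isalnum()
--             char_counts[char] = char_counts.get(char, 0) + 1
--
--     return max(char_counts.values()) if char_counts else 0
-- ===== SOURCE B (Python) =====
-- def application(text=None):
--     if text is None:
--         return 0
--     chars = sorted(c for c in text.lower() if c.isalnum())
--     best = 0
--     i = 0
--     n = len(chars)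
--     while i < n:
--         j = i
--         while j < n and chars[j] == chars[i]:
--             j += 1
--         if j - i > best:
--             best = j - i
--         i = j
--     return best
-- ===== Notes on version B (the rewrite author's own statement) =====
-- stated objective: alternative
-- what changed: Replaces the hash-map character counter with a sort-then-scan strategy: B sorts the lowercased alphanumeric characters and finds the longest run with a two-pointer scan, so no dictionary is built.
import Mathlib
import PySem

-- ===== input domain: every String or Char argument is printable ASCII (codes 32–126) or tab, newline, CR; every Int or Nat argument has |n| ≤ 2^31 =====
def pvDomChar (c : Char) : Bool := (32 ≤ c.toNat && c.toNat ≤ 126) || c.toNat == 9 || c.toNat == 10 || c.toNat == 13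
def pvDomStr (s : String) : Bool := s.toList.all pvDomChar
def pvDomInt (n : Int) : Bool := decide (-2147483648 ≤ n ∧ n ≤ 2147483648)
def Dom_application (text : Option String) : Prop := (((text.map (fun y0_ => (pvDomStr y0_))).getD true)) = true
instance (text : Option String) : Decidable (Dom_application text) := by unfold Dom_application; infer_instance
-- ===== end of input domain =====

-- B replaces A's dict-based character counting by sorting the alphanumeric characters and
-- scanning for the longest run (alternative algorithm, not claimed faster).

-- ===== PORT A =====
def application (text : Option String) : Int :=
  match text with
  | none => 0
  | some t =>
    let t := PySem.Str.lower t
    let counts := t.toList.foldl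
      (fun (d : PySem.Dict Char Int) c =>
        if PySem.Chars.isalnum c then d.insert c (d.getD c 0 + 1) else d)
      PySem.Dict.empty
    if PySem.Dict.size counts = 0 then 0
    else (PySem.List.max? counts.values (fun v => v)).getD 0

-- ===== PORT B =====
-- the two-pointer while loop of Source B: the inner loop advancing j over equal chars is the
-- takeWhile/dropWhile split of the remaining sublist
def runBest (chars : List Char) (best : Int) : Int :=
  match chars with
  | [] => best
  | c :: rest =>
    let len : Int := (rest.takeWhile (fun d => d == c)).length + 1
    runBest (rest.dropWhile (fun d => d == c)) (if len > best then len else best)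
termination_by chars.length
decreasing_by
  simp only [List.length_cons]
  exact Nat.lt_succ_of_le (List.Sublist.length_le (List.dropWhile_sublist _))

def application_alt (text : Option String) : Int :=
  match text with
  | none => 0
  | some t =>
    let chars := PySem.List.sorted ((PySem.Str.lower t).toList.filter PySem.Chars.isalnum)
                   (fun c => c) false
    runBest chars 0

-- ===== PRECONDITION & SPEC =====
def Spec_application (text : Option String) (out : Int) : Prop := out = application_alt text
instance (text : Option String) (out : Int) : Decidable (Spec_application text out) := by unfold Spec_application; infer_instance

-- ===== CLAIM (what is proved, stated in full; the proofs are below) =====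
def Claim_equal_application : Prop := ∀ (text : Option String), Dom_application text → Spec_application text (application text)

-- ===== LEMMAS AND PROOFS =====

-- the maximum multiplicity of an element of l (0 for [])
def pvM (l : List Char) : Int :=
  ((PySem.Set.ofList l).map (fun c => (l.count c : Int))).foldl max 0

theorem pv_foldl_guard {α β : Type} (p : α → Bool) (f : β → α → β) :
    ∀ (l : List α) (b : β),
      l.foldl (fun b a => if p a then f b a else b) b = (l.filter p).foldl f b := by
  intro l
  induction l with
  | nil => intro b; rfl
  | cons a l ih =>
    intro b
    by_cases h : p a <;> simp [h, ih]

theorem pv_foldl_max_left : ∀ (l : List Int) (a b : Int),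
    l.foldl max (max a b) = max a (l.foldl max b) := by
  intro l
  induction l with
  | nil => intro a b; rfl
  | cons x l ih =>
    intro a b
    simp only [List.foldl_cons, max_assoc, ih]

theorem pv_foldl_max_perm {l l' : List Int} (h : l.Perm l') (a : Int) :
    l.foldl max a = l'.foldl max a := by
  induction h generalizing a with
  | nil => rfl
  | cons x _ ih => simp only [List.foldl_cons]; exact ih _
  | swap x y l => simp only [List.foldl_cons, max_right_comm]
  | trans _ _ ih1 ih2 => exact (ih1 a).trans (ih2 a)

theorem pv_setEquiv_perm {l l' : List Char} (h : ∀ x, x ∈ l ↔ x ∈ l') :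
    (PySem.Set.ofList l).Perm (PySem.Set.ofList l') := by
  rw [List.perm_ext_iff_of_nodup (PySem.Set.nodup_ofList l) (PySem.Set.nodup_ofList l')]
  intro a
  rw [PySem.Set.mem_ofList, PySem.Set.mem_ofList]
  exact h a

theorem pvM_perm {l l' : List Char} (h : l.Perm l') : pvM l = pvM l' := by
  unfold pvM
  have hc : (fun c => ((l.count c : Int))) = (fun c => ((l'.count c : Int))) := by
    funext c; exact congrArg _ (h.count_eq c)
  rw [hc]
  exact pv_foldl_max_perm ((pv_setEquiv_perm (fun x => ⟨fun hx => h.mem_iff.mp hx,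
    fun hx => h.mem_iff.mpr hx⟩)).map _) 0

theorem pvM_nonneg (l : List Char) : 0 ≤ pvM l := (PySem.List.le_foldl_max _ _).1

-- run decomposition of a sorted list: the head's copies are exactly the takeWhile block
theorem pv_not_mem_dropWhile {c : Char} {rest : List Char}
    (hs : (c :: rest).Pairwise (· ≤ ·)) :
    c ∉ rest.dropWhile (fun d => d == c) := by
  intro hmem
  have hsub : (rest.dropWhile (fun d => d == c)).Sublist rest := List.dropWhile_sublist _
  cases hdr : rest.dropWhile (fun d => d == c) with
  | nil => rw [hdr] at hmem; exact (List.not_mem_nil).elim hmem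
  | cons d ds =>
    have hd : ¬ (d == c) = true := by
      have := List.head?_dropWhile_not (p := fun d => d == c) (l := rest)
      rw [hdr] at this; simpa using this
    have hdne : d ≠ c := fun h => hd (by simp [h])
    have hcd : c ≤ d := by
      have : d ∈ rest := hsub.mem (by rw [hdr]; exact List.mem_cons_self)
      exact (List.pairwise_cons.mp hs).1 d this
    have hpw : (d :: ds).Pairwise (· ≤ ·) :=
      ((List.pairwise_cons.mp hs).2).sublist (hdr ▸ hsub)
    rw [hdr] at hmem
    rcases List.mem_cons.mp hmem with h | h
    · exact hdne h.symm
    · have : d ≤ c := (List.pairwise_cons.mp hpw).1 c h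
      exact hdne (le_antisymm this hcd)

theorem pv_mem_takeWhile_eq {c : Char} {rest : List Char} {x : Char}
    (hx : x ∈ rest.takeWhile (fun d => d == c)) : x = c := by
  have := List.mem_takeWhile_imp hx
  simpa using this

-- pvM of a sorted cons: head run length max with pvM of the remainder
theorem pvM_cons_sorted {c : Char} {rest : List Char}
    (hs : (c :: rest).Pairwise (· ≤ ·)) :
    pvM (c :: rest) =
      max (((rest.takeWhile (fun d => d == c)).length : Int) + 1)
          (pvM (rest.dropWhile (fun d => d == c))) := by
  set tk := rest.takeWhile (fun d => d == c) with htk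
  set dr := rest.dropWhile (fun d => d == c) with hdr
  have hrest : tk ++ dr = rest := List.takeWhile_append_dropWhile
  have hcdr : c ∉ dr := pv_not_mem_dropWhile hs
  -- counts in c :: rest
  have hcount_c : ((c :: rest).count c : Int) = (tk.length : Int) + 1 := by
    have h1 : rest.count c = tk.length := by
      rw [← hrest, List.count_append]
      have h2 : tk.count c = tk.length :=
        List.count_eq_length.mpr (fun x hx => by
          have := pv_mem_takeWhile_eq (htk ▸ hx); simp [this])
      have h3 : dr.count c = 0 := List.count_eq_zero.mpr hcdr
      omega
    rw [List.count_cons_self, h1]; push_cast; ring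
  have hcount_mem : ∀ x ∈ dr, (c :: rest).count x = dr.count x := by
    intro x hx
    have hxc : x ≠ c := fun h => hcdr (h ▸ hx)
    have h4 : (c :: rest).count x = rest.count x := by
      simp [Ne.symm hxc]
    have h5 : tk.count x = 0 := List.count_eq_zero.mpr (fun hmem =>
      hxc (pv_mem_takeWhile_eq (htk ▸ hmem)))
    rw [h4, ← hrest, List.count_append]
    omega
  -- pass to the permuted distinct list c :: Set.ofList dr
  have hmemiff : ∀ x, x ∈ PySem.Set.ofList (c :: rest) ↔ x ∈ (c :: PySem.Set.ofList dr) := by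
    intro x
    rw [PySem.Set.mem_ofList]
    simp only [List.mem_cons, PySem.Set.mem_ofList]
    constructor
    · intro hx
      rcases hx with h | h
      · exact Or.inl h
      · rw [← hrest] at h
        rcases List.mem_append.mp h with h | h
        · exact Or.inl (pv_mem_takeWhile_eq (htk ▸ h))
        · exact Or.inr h
    · intro hx
      rcases hx with h | h
      · exact Or.inl h
      · exact Or.inr (by rw [← hrest]; exact List.mem_append_right _ h)
  have hnd : (c :: PySem.Set.ofList dr).Nodup :=
    List.nodup_cons.mpr ⟨fun h => hcdr ((PySem.Set.mem_ofList _ _).mp h),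
      PySem.Set.nodup_ofList _⟩
  have hperm : (PySem.Set.ofList (c :: rest)).Perm (c :: PySem.Set.ofList dr) := by
    rw [List.perm_ext_iff_of_nodup (PySem.Set.nodup_ofList _) hnd]
    exact hmemiff
  unfold pvM
  rw [pv_foldl_max_perm (hperm.map (fun x => (((c :: rest).count x : Int)))) 0]
  simp only [List.map_cons, List.foldl_cons, hcount_c]
  rw [List.map_congr_left (fun x hx => by
    rw [hcount_mem x ((PySem.Set.mem_ofList _ _).mp hx)])]
  have h0 : max 0 ((tk.length : Int) + 1) = (tk.length : Int) + 1 := by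
    apply max_eq_right; positivity
  rw [h0]
  have := pv_foldl_max_left ((PySem.Set.ofList dr).map (fun c => ((dr.count c : Int))))
    ((tk.length : Int) + 1) 0
  rw [max_eq_left (by positivity)] at this
  rw [this]

-- the two-pointer scan of a sorted list computes max best (pvM l)
theorem pv_runBest_sorted : ∀ (l : List Char), l.Pairwise (· ≤ ·) →
    ∀ (b : Int), 0 ≤ b → runBest l b = max b (pvM l)
  | [], _, b, hb => by
    have h0 : pvM [] = 0 := rfl
    rw [runBest, h0, max_eq_left hb]
  | (c :: rest), hs, b, hb => by
    rw [runBest]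
    set len : Int := ((rest.takeWhile (fun d => d == c)).length : Int) + 1 with hlen
    have hif : (if len > b then len else b) = max b len := by
      rcases lt_or_ge b len with h | h
      · rw [if_pos h, max_eq_right h.le]
      · rw [if_neg (not_lt.mpr h), max_eq_left h]
    have hdrs : (rest.dropWhile (fun d => d == c)).Pairwise (· ≤ ·) :=
      ((List.pairwise_cons.mp hs).2).sublist (List.dropWhile_sublist _)
    have hlt : (rest.dropWhile (fun d => d == c)).length < (c :: rest).length := by
      simp only [List.length_cons]
      exact Nat.lt_succ_of_le (List.Sublist.length_le (List.dropWhile_sublist _))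
    rw [hif, pv_runBest_sorted _ hdrs (max b len) (le_trans hb (le_max_left _ _)),
      pvM_cons_sorted hs, ← hlen, max_assoc]
termination_by l => l.length
decreasing_by exact hlt

-- A's dict branch computes pvM of the filtered character list
theorem pv_A_eq_M (fcs : List Char) :
    (if PySem.Dict.size (PySem.Dict.counter fcs) = 0 then (0 : Int)
     else (PySem.List.max? (PySem.Dict.counter fcs).values (fun v => v)).getD 0) = pvM fcs := by
  have hvals : (PySem.Dict.counter fcs).values
      = (PySem.Set.ofList fcs).map (fun k => ((fcs.count k : Int))) := by
    simp only [PySem.Dict.values, PySem.Dict.items_counter, List.map_map]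
    rfl
  cases hS : PySem.Set.ofList fcs with
  | nil =>
    have hsz : PySem.Dict.size (PySem.Dict.counter fcs) = 0 := by
      simp [PySem.Dict.size, PySem.Dict.items_counter, hS]
    rw [if_pos hsz]
    unfold pvM
    rw [hS]
    rfl
  | cons k S' =>
    have hsz : PySem.Dict.size (PySem.Dict.counter fcs) ≠ 0 := by
      simp [PySem.Dict.size, PySem.Dict.items_counter, hS]
    rw [if_neg hsz, hvals, hS]
    simp only [List.map_cons, PySem.List.max?_id_cons, Option.getD_some]
    unfold pvM
    rw [hS]
    simp only [List.map_cons, List.foldl_cons]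
    rw [max_eq_right (by positivity : (0:Int) ≤ (fcs.count k : Int))]

-- ===== VERDICT (by name: the statement is the Claim_ definition above) =====
theorem application_spec : Claim_equal_application := by
  intro text _
  unfold Spec_application application application_alt
  cases text with
  | none => rfl
  | some t =>
    simp only
    set fcs := ((PySem.Str.lower t).toList.filter PySem.Chars.isalnum) with hfcs
    have hA : (PySem.Str.lower t).toList.foldl
        (fun (d : PySem.Dict Char Int) c =>
          if PySem.Chars.isalnum c then d.insert c (d.getD c 0 + 1) else d)
        PySem.Dict.empty = PySem.Dict.counter fcs := by
      rw [pv_foldl_guard, hfcs, PySem.Dict.foldl_insert_getD_add_one_eq_counter]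
    rw [hA, pv_A_eq_M]
    have hpw : (PySem.List.sorted fcs (fun c => c) false).Pairwise (· ≤ ·) := by
      simpa using PySem.List.sorted_pairwise fcs (fun c => c)
    rw [pv_runBest_sorted _ hpw 0 le_rfl,
      max_eq_right (pvM_nonneg _),
      pvM_perm (PySem.List.sorted_perm fcs (fun c => c) false)]
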